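-- pv_equiv track=rewrite | github.com/Weasyl/weasyl | weasyl/index.py | partition_submissions
-- ===== SOURCE A (Python) =====
-- from collections import defaultdict
--
-- def partition_submissions(submissions):
--     buckets: defaultdict[int, list] = defaultdict(list)
--     for s in submissions:
--         if 'charid' in s:
--             bucket = 'char'
--         else:
--             bucket = s['subtype'] // 1000
--         buckets[bucket].append(s)
--
--     return (
--         submissions[:22],
--         buckets[1][:11],
--         buckets[2][:11],
--         buckets[3][:11],
--         buckets['char'][:11],
--     )
-- ===== SOURCE B (Python) =====
-- def partition_submissions(submissions):
--     def take_matching(pred, limit):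
--         out = []
--         for s in submissions:
--             if len(out) == limit:
--                 break
--             if pred(s):
--                 out.append(s)
--         return out
--
--     return (
--         take_matching(lambda s: True, 22),
--         take_matching(lambda s: 'charid' not in s and s['subtype'] // 1000 == 1, 11),
--         take_matching(lambda s: 'charid' not in s and s['subtype'] // 1000 == 2, 11),
--         take_matching(lambda s: 'charid' not in s and s['subtype'] // 1000 == 3, 11),
--         take_matching(lambda s: 'charid' in s, 11),
--     )
-- ===== Notes on version B (the rewrite author's own statement) =====
-- stated objective: alternative
-- what changed: Replaces the single-pass defaultdict partitioning with five independent early-stopping scans: each output is collected directly by scanning submissions for matching rows and breaking as soon as its prefix limit (22 or 11) is reached, so no bucket table is ever built.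
import Mathlib
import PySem

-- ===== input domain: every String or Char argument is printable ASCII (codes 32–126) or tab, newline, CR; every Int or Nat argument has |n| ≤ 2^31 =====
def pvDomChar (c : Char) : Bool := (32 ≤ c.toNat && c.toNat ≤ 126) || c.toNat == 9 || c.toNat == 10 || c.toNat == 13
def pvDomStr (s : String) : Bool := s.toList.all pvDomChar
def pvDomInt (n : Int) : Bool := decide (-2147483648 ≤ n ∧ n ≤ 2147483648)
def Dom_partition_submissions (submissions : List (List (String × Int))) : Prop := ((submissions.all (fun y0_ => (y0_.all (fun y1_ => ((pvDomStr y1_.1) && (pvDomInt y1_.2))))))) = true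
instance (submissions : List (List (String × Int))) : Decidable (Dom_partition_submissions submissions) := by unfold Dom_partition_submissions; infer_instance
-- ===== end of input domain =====

-- B replaces the defaultdict partitioning pass with five independent early-stopping
-- scans, one per output (alternative decomposition, same O(n) cost).


-- ===== PORT A =====
-- 'charid' in s  (dict membership: any pair with that key)
def pvHasKey (s : List (String × Int)) (k : String) : Bool := s.any (fun p => p.1 == k)

-- s['subtype'] as first-match lookup; the default 0 is never reached on Pre_ inputs
-- (Python raises KeyError exactly there, which Pre_ excludes).
def pvSubtype (s : List (String × Int)) : Int := ((s.lookup "subtype").getD 0)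

-- the loop body: buckets[bucket].append(s) on a defaultdict(list).
-- The Python dict's mixed-type keys (1,2,3 and 'char') are encoded as Option Int: none = 'char'.
def pvStep (d : PySem.Dict (Option Int) (List (List (String × Int)))) (s : List (String × Int)) :
    PySem.Dict (Option Int) (List (List (String × Int))) :=
  let bucket : Option Int :=
    if pvHasKey s "charid" then none
    else some (PySem.Int.floordiv (pvSubtype s) 1000)
  d.insert bucket (d.getD bucket [] ++ [s])

def partition_submissions (submissions : List (List (String × Int))) : (List (List (String × Int))) × (List (List (String × Int))) × (List (List (String × Int))) × (List (List (String × Int))) × (List (List (String × Int))) :=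
  let buckets := submissions.foldl pvStep PySem.Dict.empty
  (PySem.List.slice submissions none (some 22),
   PySem.List.slice (buckets.getD (some 1) []) none (some 11),
   PySem.List.slice (buckets.getD (some 2) []) none (some 11),
   PySem.List.slice (buckets.getD (some 3) []) none (some 11),
   PySem.List.slice (buckets.getD none []) none (some 11))

-- ===== PORT B =====
-- take_matching: scan the rows, collecting those that satisfy pred, stopping as soon
-- as limit rows are collected (the loop's `break`); structural recursion on the rows.
def pvTakeMatching (pred : List (String × Int) → Bool) :
    Nat → List (List (String × Int)) → List (List (String × Int))
  | _, [] => []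
  | 0, _ => []
  | Nat.succ m, s :: rest =>
      if pred s then s :: pvTakeMatching pred m rest
      else pvTakeMatching pred (Nat.succ m) rest

def partition_submissions_alt (submissions : List (List (String × Int))) : (List (List (String × Int))) × (List (List (String × Int))) × (List (List (String × Int))) × (List (List (String × Int))) × (List (List (String × Int))) :=
  (pvTakeMatching (fun _ => true) 22 submissions,
   pvTakeMatching (fun s => !pvHasKey s "charid" && (PySem.Int.floordiv (pvSubtype s) 1000 == 1)) 11 submissions,
   pvTakeMatching (fun s => !pvHasKey s "charid" && (PySem.Int.floordiv (pvSubtype s) 1000 == 2)) 11 submissions,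
   pvTakeMatching (fun s => !pvHasKey s "charid" && (PySem.Int.floordiv (pvSubtype s) 1000 == 3)) 11 submissions,
   pvTakeMatching (fun s => pvHasKey s "charid") 11 submissions)

-- ===== PRECONDITION & SPEC =====
-- Pre_ excludes exactly the inputs where Python A raises KeyError: a submission without
-- 'charid' must carry a 'subtype' key.
def Pre_partition_submissions (submissions : List (List (String × Int))) : Prop :=
  ∀ s ∈ submissions, pvHasKey s "charid" = true ∨ pvHasKey s "subtype" = true
instance (submissions : List (List (String × Int))) : Decidable (Pre_partition_submissions submissions) := by unfold Pre_partition_submissions; infer_instance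

def pvWitness_partition_submissions : (List (List (String × Int))) :=
  [[("subtype", 1010)], [("charid", 5)], [("subtype", 2500)]]

def Spec_partition_submissions (submissions : List (List (String × Int))) (out : (List (List (String × Int))) × (List (List (String × Int))) × (List (List (String × Int))) × (List (List (String × Int))) × (List (List (String × Int)))) : Prop := out = partition_submissions_alt submissions
instance (submissions : List (List (String × Int))) (out : (List (List (String × Int))) × (List (List (String × Int))) × (List (List (String × Int))) × (List (List (String × Int))) × (List (List (String × Int)))) : Decidable (Spec_partition_submissions submissions out) := by
  unfold Spec_partition_submissions
  have h : DecidableEq (List (List (String × Int))) := by infer_instance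
  exact @instDecidableEqProd _ _ h (@instDecidableEqProd _ _ h (@instDecidableEqProd _ _ h (@instDecidableEqProd _ _ h h))) out (partition_submissions_alt submissions)

-- ===== CLAIM (what is proved, stated in full; the proofs are below) =====
def Claim_equal_partition_submissions : Prop := ∀ (submissions : List (List (String × Int))), Dom_partition_submissions submissions → Pre_partition_submissions submissions → Spec_partition_submissions submissions (partition_submissions submissions)

-- ===== LEMMAS AND PROOFS =====
-- the bucket A files submission s under
def pvBucketKey (s : List (String × Int)) : Option Int :=
  if pvHasKey s "charid" then none
  else some (PySem.Int.floordiv (pvSubtype s) 1000)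

theorem pvStep_eq (d : PySem.Dict (Option Int) (List (List (String × Int)))) (s : List (String × Int)) :
    pvStep d s = d.insert (pvBucketKey s) (d.getD (pvBucketKey s) [] ++ [s]) := rfl

-- loop invariant: after folding pvStep over subs starting from d, bucket k holds
-- what d already held followed by the submissions of subs whose bucket is k
theorem pvFold_getD (subs : List (List (String × Int)))
    (d : PySem.Dict (Option Int) (List (List (String × Int)))) (k : Option Int) :
    (subs.foldl pvStep d).getD k [] =
      d.getD k [] ++ subs.filter (fun s => pvBucketKey s == k) := by
  induction subs generalizing d with
  | nil => simp
  | cons s subs ih =>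
    simp only [List.foldl_cons, List.filter_cons, ih, pvStep_eq, PySem.Dict.getD_insert]
    by_cases h : pvBucketKey s = k
    · subst h; simp
    · have hne : ¬ (k = pvBucketKey s) := fun e => h e.symm
      have hb : (pvBucketKey s == k) = false := by simp [h]
      simp [hne, hb]

-- the early-stopping scan collects the first n matches: it equals filter-then-take
theorem pvTakeMatching_eq (pred : List (String × Int) → Bool)
    (xs : List (List (String × Int))) : ∀ n,
    pvTakeMatching pred n xs = (xs.filter pred).take n := by
  induction xs with
  | nil => intro n; cases n <;> rfl
  | cons s rest ih =>
    intro n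
    cases n with
    | zero => simp [pvTakeMatching]
    | succ m =>
      by_cases h : pred s = true
      · simp [pvTakeMatching, h, ih]
      · simp [pvTakeMatching, h, ih]

theorem pvBucketKey_eq_some (s : List (String × Int)) (k : Int) :
    (pvBucketKey s == some k) =
      (!pvHasKey s "charid" && (PySem.Int.floordiv (pvSubtype s) 1000 == k)) := by
  unfold pvBucketKey
  cases hc : pvHasKey s "charid" <;>
    simp only [Bool.false_eq_true, if_false, if_true, Bool.not_false, Bool.not_true,
      Bool.true_and, Bool.false_and] <;> rfl

theorem pvBucketKey_eq_char (s : List (String × Int)) :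
    (pvBucketKey s == (none : Option Int)) = pvHasKey s "charid" := by
  unfold pvBucketKey
  cases hc : pvHasKey s "charid" <;>
    simp only [Bool.false_eq_true, if_false, if_true] <;> rfl

-- ===== VERDICT (by name: the statement is the Claim_ definition above) =====
theorem partition_submissions_spec : Claim_equal_partition_submissions := by
  intro subs _ _
  unfold Spec_partition_submissions partition_submissions partition_submissions_alt
  have h22 : PySem.List.slice subs none (some 22) = subs.take 22 := by
    rw [show ((22:Int) = ((22:Nat):Int)) from rfl, PySem.List.slice_to_natCast]
  have h11 : ∀ (xs : List (List (String × Int))),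
      PySem.List.slice xs none (some 11) = xs.take 11 := by
    intro xs
    rw [show ((11:Int) = ((11:Nat):Int)) from rfl, PySem.List.slice_to_natCast]
  simp only [pvFold_getD, PySem.Dict.getD_empty, List.nil_append, h22, h11,
    pvTakeMatching_eq, pvBucketKey_eq_some, pvBucketKey_eq_char, List.filter_true]
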